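-- pv_equiv track=rewrite | github.com/heyfinal/NeuralSync2 | neuralsync/memory_merger.py | _is_append_pattern
-- ===== SOURCE A (Python) =====
-- from typing import Dict, Any, List, Optional, Set, Tuple
--
-- def _is_append_pattern(contents: List[str]) -> bool:
--     """Check if strings follow an append-only pattern"""
--     if len(contents) < 2:
--         return False
--
--     sorted_contents = sorted(contents, key=len)
--
--     for i in range(1, len(sorted_contents)):
--         if not sorted_contents[i].startswith(sorted_contents[i-1]):
--             return False
--
--     return True
-- ===== SOURCE B (Python) =====
-- def _is_append_pattern(contents):
--     """Check if strings follow an append-only pattern"""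
--     if len(contents) < 2:
--         return False
--     longest = max(contents, key=len)
--     return all(longest.startswith(s) for s in contents)
-- ===== Notes on version B (the rewrite author's own statement) =====
-- stated objective: simpler
-- what changed: Replaced the sort-then-adjacent-pairs scan with a single pass that finds the first longest string and checks that every string is a prefix of it (prefixes of a common string are nested, so the pivot check is equivalent to the sorted chain).
import Mathlib
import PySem

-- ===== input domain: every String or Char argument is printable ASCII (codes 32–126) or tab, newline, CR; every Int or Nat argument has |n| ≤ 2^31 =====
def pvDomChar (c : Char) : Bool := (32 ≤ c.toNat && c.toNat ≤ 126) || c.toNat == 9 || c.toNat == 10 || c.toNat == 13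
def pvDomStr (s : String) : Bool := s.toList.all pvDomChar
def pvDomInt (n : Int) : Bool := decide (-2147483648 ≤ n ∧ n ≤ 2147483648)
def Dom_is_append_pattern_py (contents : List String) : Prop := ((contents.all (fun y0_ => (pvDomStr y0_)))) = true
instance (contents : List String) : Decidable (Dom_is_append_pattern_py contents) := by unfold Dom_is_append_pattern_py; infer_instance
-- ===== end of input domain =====

-- B replaces A's sort-then-adjacent-pairs scan by one pass: find the first longest
-- string and check every string is a prefix of it (objective: simpler).

-- ===== PORT A =====
-- the 'for i in range(1, len(sorted_contents))' loop with its early 'return False'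
def pvALoop (sc : List String) : List Int → Bool
  | [] => true
  | i :: rest =>
      -- indices drawn from range(1, len(sc)) are always in range, so the "" default is never used
      if !(PySem.Str.startswith (PySem.List.pyGetD sc i "") (PySem.List.pyGetD sc (i - 1) "")) then
        false
      else pvALoop sc rest

def is_append_pattern_py (contents : List String) : Bool :=
  if contents.length < 2 then false
  else
    let sorted_contents := PySem.List.sorted contents (fun s => PySem.Str.len s) false
    pvALoop sorted_contents (PySem.List.pyRange 1 (sorted_contents.length : Int) 1)

-- ===== PORT B =====
def is_append_pattern_py_alt (contents : List String) : Bool :=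
  if contents.length < 2 then false
  else
    match PySem.List.max? contents (fun s => PySem.Str.len s) with
    | some longest => contents.all (fun s => PySem.Str.startswith longest s)
    | none => false   -- unreachable: contents is nonempty here

-- ===== PRECONDITION & SPEC =====
def Spec_is_append_pattern_py (contents : List String) (out : Bool) : Prop := out = is_append_pattern_py_alt contents
instance (contents : List String) (out : Bool) : Decidable (Spec_is_append_pattern_py contents out) := by unfold Spec_is_append_pattern_py; infer_instance

-- ===== CLAIM (what is proved, stated in full; the proofs are below) =====
def Claim_equal_is_append_pattern_py : Prop := ∀ (contents : List String), Dom_is_append_pattern_py contents → Spec_is_append_pattern_py contents (is_append_pattern_py contents)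

-- ===== LEMMAS AND PROOFS =====

-- A's loop with its early exit is the conjunction over its index list
lemma pvALoop_eq_all (sc : List String) (L : List Int) :
    pvALoop sc L = L.all (fun i =>
      PySem.Str.startswith (PySem.List.pyGetD sc i "") (PySem.List.pyGetD sc (i - 1) "")) := by
  induction L with
  | nil => rfl
  | cons i rest ih =>
      simp only [pvALoop, List.all_cons, ih]
      cases PySem.Str.startswith (PySem.List.pyGetD sc i "") (PySem.List.pyGetD sc (i - 1) "") <;> simp

-- two prefixes of a common list are nested by length
lemma prefix_of_prefix_of_length_le {s t u : List Char}
    (hs : s <+: u) (ht : t <+: u) (hlen : s.length ≤ t.length) : s <+: t := by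
  rcases List.prefix_or_prefix_of_prefix hs ht with h | h
  · exact h
  · have heq : t.length = s.length := le_antisymm h.length_le hlen
    exact (h.eq_of_length heq) ▸ List.prefix_refl t

-- an adjacent prefix chain is transitive
lemma chain_prefix_trans (sc : List String)
    (h : ∀ k : Nat, k + 1 < sc.length → (sc.getD k "").toList <+: (sc.getD (k+1) "").toList) :
    ∀ (i d : Nat), i + d < sc.length → (sc.getD i "").toList <+: (sc.getD (i+d) "").toList := by
  intro i d
  induction d with
  | zero => intro _; exact List.prefix_refl _
  | succ e ih =>
      intro hd
      have h2 := h (i + e) (by omega)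
      have : i + (e + 1) = (i + e) + 1 := by omega
      rw [this]
      exact (ih (by omega)).trans h2

-- A's adjacent-chain condition over the sorted list ↔ B's everything-is-a-prefix-of-the-max condition
lemma chain_iff_all_prefix (contents : List String) (S : String)
    (hS : PySem.List.max? contents (fun s => PySem.Str.len s) = some S) :
    (∀ k : Nat, k + 1 < (PySem.List.sorted contents (fun s => PySem.Str.len s) false).length →
        ((PySem.List.sorted contents (fun s => PySem.Str.len s) false).getD k "").toList <+:
        ((PySem.List.sorted contents (fun s => PySem.Str.len s) false).getD (k+1) "").toList) ↔
    (∀ s ∈ contents, s.toList <+: S.toList) := by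
  set key := fun s => PySem.Str.len s with hkey
  set sc := PySem.List.sorted contents key false with hsc
  have hperm : sc.Perm contents := PySem.List.sorted_perm contents key false
  have hmem : ∀ x : String, x ∈ sc ↔ x ∈ contents := fun x => hperm.mem_iff
  have hSmem : S ∈ contents := PySem.List.max?_mem hS
  have hSmax : ∀ y ∈ contents, key y ≤ key S := PySem.List.max?_isMax hS
  have hlenkey : ∀ s : String, key s = s.toList.length := by
    intro s; simp [hkey]
  have hne : sc ≠ [] := by
    rw [hsc, Ne, PySem.List.sorted_eq_nil_iff]
    exact List.ne_nil_of_mem hSmem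
  have hpos : 0 < sc.length := List.length_pos_of_ne_nil hne
  constructor
  · intro hchain s hs
    -- everything is a prefix of the last element L, and L = S
    set L := sc.getD (sc.length - 1) "" with hL
    have hall : ∀ i : Nat, i < sc.length → (sc.getD i "").toList <+: L.toList := by
      intro i hi
      have h0 := chain_prefix_trans sc hchain i (sc.length - 1 - i) (by omega)
      rwa [show i + (sc.length - 1 - i) = sc.length - 1 by omega] at h0
    have hLmem : L ∈ contents := by
      rw [← hmem, hL, List.getD_eq_getElem _ _ (by omega)]
      exact List.getElem_mem _
    obtain ⟨jS, hjS, hjSeq⟩ := List.mem_iff_getElem.mp ((hmem S).mpr hSmem)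
    have hSpref : S.toList <+: L.toList := by
      have h0 := hall jS hjS
      rwa [List.getD_eq_getElem _ _ hjS, hjSeq] at h0
    have hSL : S.toList = L.toList := by
      have h1 : key L ≤ key S := hSmax L hLmem
      rw [hlenkey, hlenkey] at h1
      exact hSpref.eq_of_length (le_antisymm hSpref.length_le (by exact_mod_cast h1))
    obtain ⟨j, hj, hjeq⟩ := List.mem_iff_getElem.mp ((hmem s).mpr hs)
    have h0 := hall j hj
    rw [List.getD_eq_getElem _ _ hj, hjeq] at h0
    rwa [hSL]
  · intro hall k hk
    have h1 : sc.getD k "" ∈ contents := by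
      rw [← hmem, List.getD_eq_getElem _ _ (by omega)]
      exact List.getElem_mem _
    have h2 : sc.getD (k+1) "" ∈ contents := by
      rw [← hmem, List.getD_eq_getElem _ _ hk]
      exact List.getElem_mem _
    have hmono : key (sc.getD k "") ≤ key (sc.getD (k+1) "") := by
      rw [List.getD_eq_getElem _ _ (show k < sc.length by omega), List.getD_eq_getElem _ _ hk]
      have h0 := PySem.List.key_sorted_getElem_mono (xs := contents) (key := key)
        (p := k) (q := k+1) (by omega) (by rw [← hsc]; exact hk)
      simpa [← hsc] using h0
    rw [hlenkey, hlenkey] at hmono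
    exact prefix_of_prefix_of_length_le (hall _ h1) (hall _ h2) (by exact_mod_cast hmono)

-- a Python index into the list, as a Nat index
lemma pyGetD_toNat (sc : List String) (i : Int) (h1 : 0 ≤ i) :
    PySem.List.pyGetD sc i "" = sc.getD i.toNat "" := by
  have h := PySem.List.pyGetD_natCast sc i.toNat ""
  rwa [show ((i.toNat : Nat) : Int) = i by omega] at h

-- A's loop over range(1, n) in terms of adjacent Nat indices
lemma aLoop_true_iff (sc : List String) :
    (pvALoop sc (PySem.List.pyRange 1 (sc.length : Int) 1) = true) ↔
    ∀ k : Nat, k + 1 < sc.length →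
      PySem.Str.startswith (sc.getD (k+1) "") (sc.getD k "") = true := by
  rw [pvALoop_eq_all, List.all_eq_true]
  constructor
  · intro h k hk
    have hmem : ((k + 1 : Nat) : Int) ∈ PySem.List.pyRange 1 (sc.length : Int) 1 := by
      rw [PySem.List.mem_pyRange_one]
      constructor
      · exact_mod_cast Nat.le_add_left 1 k
      · exact_mod_cast hk
    have hx := h _ hmem
    rw [pyGetD_toNat _ _ (by omega), pyGetD_toNat _ _ (by omega)] at hx
    rwa [show ((k + 1 : Nat) : Int).toNat = k + 1 by omega,
         show (((k + 1 : Nat) : Int) - 1).toNat = k by omega] at hx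
  · intro h i hi
    obtain ⟨h1, h2⟩ := PySem.List.mem_pyRange_one.mp hi
    rw [pyGetD_toNat _ _ (by omega), pyGetD_toNat _ _ (by omega)]
    rw [show (i - 1).toNat = i.toNat - 1 by omega]
    have hx := h (i.toNat - 1) (by omega)
    rwa [show i.toNat - 1 + 1 = i.toNat by omega] at hx

-- ===== VERDICT (by name: the statement is the Claim_ definition above) =====
theorem is_append_pattern_py_spec : Claim_equal_is_append_pattern_py := by
  intro contents _
  unfold Spec_is_append_pattern_py is_append_pattern_py is_append_pattern_py_alt
  by_cases hlen : contents.length < 2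
  · simp only [if_pos hlen]
  · simp only [if_neg hlen]
    have hne : contents ≠ [] := by intro h; rw [h] at hlen; exact hlen (by simp)
    obtain ⟨S, hS⟩ : ∃ S, PySem.List.max? contents (fun s => PySem.Str.len s) = some S := by
      cases h : PySem.List.max? contents (fun s => PySem.Str.len s) with
      | none => exact absurd ((PySem.List.max?_eq_none_iff _ _).mp h) hne
      | some S => exact ⟨S, rfl⟩
    rw [hS, Bool.eq_iff_iff, aLoop_true_iff, List.all_eq_true]
    have hpref : ∀ a b : String, PySem.Str.startswith a b = true ↔ b.toList <+: a.toList := by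
      intro a b
      rw [PySem.Str.startswith_eq, PySem.Chars.startswith_iff]
    constructor
    · intro h s hs
      exact (hpref _ _).mpr (((chain_iff_all_prefix contents S hS).mp
        (fun k hk => (hpref _ _).mp (h k hk))) s hs)
    · intro h k hk
      exact (hpref _ _).mpr (((chain_iff_all_prefix contents S hS).mpr
        (fun s hs => (hpref _ _).mp (h s hs))) k hk)
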